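-- pv_equiv track=rewrite | github.com/nthhcmus/DataStructure-Algorithms | Number_Theory/057 Bang nhan.py | count
-- ===== SOURCE A (Python) =====
-- import math
--
-- def count(n, x):
--     cnt = 0
--     for i in range(1, int(math.sqrt(x)+1)):
--         j = x // i
--         if x % i == 0 and i <= n and j <= n:
--             cnt += 2
--             if i == j: cnt-=1
--     return cnt
-- ===== SOURCE B (Python) =====
-- def count(n, x):
--     # pairs (i, j) with i*j == x and 1 <= i, j <= n; none exist for x <= 0
--     if x <= 0:
--         return 0
--     # factorize x and build the full divisor list multiplicatively
--     m = x
--     p = 2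
--     divs = [1]
--     while p * p <= m:
--         if m % p == 0:
--             e = 0
--             while m % p == 0:
--                 m //= p
--                 e += 1
--             divs = [d * p ** k for d in divs for k in range(e + 1)]
--         else:
--             p += 1
--     if m > 1:
--         divs = divs + [d * m for d in divs]
--     return sum(1 for d in divs if d <= n and x // d <= n)
-- ===== Notes on version B (the rewrite author's own statement) =====
-- stated objective: alternative
-- what changed: B factorizes x by trial division into prime powers, builds the complete divisor list multiplicatively (divs = [d*p**k ...] per prime power), and counts the divisors d with d <= n and x//d <= n, replacing A's direct divisor-pair scan up to sqrt(x) with its +2/-1 perfect-square weighting.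
-- crash fix: For negative x, A raises ValueError from math.sqrt(x) while B returns 0 (no product of two positive factors is negative). — e.g. on count(3, -4): A raises ValueError, B returns 0
import Mathlib
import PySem

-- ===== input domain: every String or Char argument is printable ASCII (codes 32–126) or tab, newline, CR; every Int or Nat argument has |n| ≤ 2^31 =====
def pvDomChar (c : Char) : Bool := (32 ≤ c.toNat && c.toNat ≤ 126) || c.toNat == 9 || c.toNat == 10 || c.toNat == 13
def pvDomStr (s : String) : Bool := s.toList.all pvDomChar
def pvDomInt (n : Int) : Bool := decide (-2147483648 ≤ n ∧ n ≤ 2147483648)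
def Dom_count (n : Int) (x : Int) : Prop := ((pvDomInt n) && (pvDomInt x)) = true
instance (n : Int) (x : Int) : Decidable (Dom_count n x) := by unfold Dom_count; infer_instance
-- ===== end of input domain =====

-- B replaces A's divisor-pair enumeration up to sqrt(x) (with the +2/-1 perfect-square
-- correction) by prime factorization of x, multiplicative enumeration of the full
-- divisor list, and a count of the divisors inside the n×n window (objective:
-- alternative algorithm).

-- ===== PORT A =====
-- int(math.sqrt(x)+1) is ported as Int.sqrt x + 1; on the admitted domain 0 ≤ x ≤ 2^31
-- the float computation is exact, and Pre_count excludes x < 0, where math.sqrt raises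
-- ValueError.
def count (n : Int) (x : Int) : Int :=
  (PySem.List.pyRange 1 (Int.sqrt x + 1) 1).foldl
    (fun cnt i =>
      let j := PySem.Int.floordiv x i
      if PySem.Int.mod x i = 0 ∧ i ≤ n ∧ j ≤ n then
        (if i = j then cnt + 2 - 1 else cnt + 2)
      else cnt) 0

-- ===== PORT B =====
-- The while loops are ported with a fuel parameter as the totality guard: count_alt
-- passes fuel x.toNat + 2, provably enough for every iteration count the loops reach.

-- inner loop 'while m % p == 0: m //= p; e += 1'
def stripLoop (fuel : Nat) (m p e : Int) : Int × Int :=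
  match fuel with
  | 0 => (m, e)
  | f + 1 =>
    if PySem.Int.mod m p = 0 then stripLoop f (PySem.Int.floordiv m p) p (e + 1)
    else (m, e)

-- 'divs = [d * p ** k for d in divs for k in range(e + 1)]'
def expandDivs (p e : Int) (divs : List Int) : List Int :=
  divs.flatMap (fun d => (PySem.List.pyRange 0 (e + 1) 1).map (fun k => d * p ^ k.toNat))

-- outer loop 'while p*p <= m: if m % p == 0: <strip, extend divs> else: p += 1'
def factLoop (fuel : Nat) (m p : Int) (divs : List Int) : Int × List Int :=
  match fuel with
  | 0 => (m, divs)
  | f + 1 =>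
    if p * p ≤ m then
      if PySem.Int.mod m p = 0 then
        factLoop f (stripLoop m.toNat m p 0).1 p
          (expandDivs p (stripLoop m.toNat m p 0).2 divs)
      else factLoop f m (p + 1) divs
    else (m, divs)

def count_alt (n : Int) (x : Int) : Int :=
  if x ≤ 0 then 0
  else
    let s := factLoop (x.toNat + 2) x 2 [1]
    let divs := if 1 < s.1 then s.2 ++ s.2.map (fun d => d * s.1) else s.2
    ((divs.countP (fun d => decide (d ≤ n ∧ PySem.Int.floordiv x d ≤ n)) : Nat) : Int)

-- ===== PRECONDITION & SPEC =====
-- Pre_count excludes exactly x < 0, where A raises ValueError (math.sqrt of a negative).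
def Pre_count (n : Int) (x : Int) : Prop := 0 ≤ x
instance (n : Int) (x : Int) : Decidable (Pre_count n x) := by unfold Pre_count; infer_instance
def pvWitness_count : Int × Int := (4, 8)

-- For negative x, A raises ValueError from math.sqrt(x) while B's row scan finds no
-- column in 1..n and returns 0.
def Raises_count (n : Int) (x : Int) : Prop := x < 0
instance (n : Int) (x : Int) : Decidable (Raises_count n x) := by unfold Raises_count; infer_instance
def pvRaiseWitness_count : Int × Int := (3, -4)
def pvRaiseWitnessOut_count : Int := 0

def Spec_count (n : Int) (x : Int) (out : Int) : Prop := out = count_alt n x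
instance (n : Int) (x : Int) (out : Int) : Decidable (Spec_count n x out) := by unfold Spec_count; infer_instance

-- ===== CLAIM (what is proved, stated in full; the proofs are below) =====
def Claim_equal_count : Prop := ∀ (n : Int) (x : Int), Dom_count n x → Pre_count n x → Spec_count n x (count n x)
def Claim_raises_count : Prop := (∀ (n : Int) (x : Int), Dom_count n x → Raises_count n x → ¬ Pre_count n x) ∧ (Dom_count (pvRaiseWitness_count.1) (pvRaiseWitness_count.2) ∧ Raises_count (pvRaiseWitness_count.1) (pvRaiseWitness_count.2) ∧ count_alt (pvRaiseWitness_count.1) (pvRaiseWitness_count.2) = pvRaiseWitnessOut_count)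

-- ===== LEMMAS AND PROOFS =====

-- A's per-row condition (over exact integer ops, valid for i > 0)
abbrev condA (n x i : Int) : Prop := x % i = 0 ∧ i ≤ n ∧ x / i ≤ n
-- B's per-row condition
abbrev condB (n x i : Int) : Prop := x % i = 0 ∧ 1 ≤ x / i ∧ x / i ≤ n

-- sqrt characterisation on the relevant range
lemma le_sqrt_iff (x i : Int) (hi : 0 < i) : i ≤ Int.sqrt x ↔ i * i ≤ x := by
  rcases (by omega : 0 ≤ x ∨ x < 0) with hx | hx
  · have h1 : Int.sqrt x = ((Nat.sqrt x.toNat : Nat) : Int) := rfl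
    rw [h1, show (i ≤ ((Nat.sqrt x.toNat : Nat) : Int)) ↔ i.toNat ≤ Nat.sqrt x.toNat by omega,
       Nat.le_sqrt,
       show (i.toNat * i.toNat ≤ x.toNat) ↔ ((i.toNat * i.toNat : Nat) : Int) ≤ x by push_cast; omega]
    push_cast [Int.toNat_of_nonneg hi.le]
    exact Iff.rfl
  · have h1 : Int.sqrt x = 0 := by
      unfold Int.sqrt
      simp [Int.toNat_of_nonpos hx.le]
    constructor
    · intro h; omega
    · intro h; nlinarith

-- a sum over a unit-step range is a sum over Finset.Ico
lemma pyRange_sum (a b : Int) (g : Int → Int) :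
    ((PySem.List.pyRange a b 1).map g).sum = ∑ i ∈ Finset.Ico a b, g i := by
  rw [← List.sum_toFinset _ (PySem.List.nodup_pyRange_one a b)]
  apply Finset.sum_congr _ (fun _ _ => rfl)
  ext i
  simp [PySem.List.mem_pyRange_one, Finset.mem_Ico]

-- A's fold as a Finset sum of weighted divisor-pair contributions
lemma count_eq_sum (n x : Int) :
    count n x = ∑ i ∈ Finset.Ico 1 (Int.sqrt x + 1),
      (if condA n x i then (if i = x / i then (1:Int) else 2) else 0) := by
  unfold count
  rw [show (fun (cnt : Int) (i : Int) =>
        let j := PySem.Int.floordiv x i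
        if PySem.Int.mod x i = 0 ∧ i ≤ n ∧ j ≤ n then
          (if i = j then cnt + 2 - 1 else cnt + 2)
        else cnt)
      = fun (cnt : Int) (i : Int) => cnt +
          (if PySem.Int.mod x i = 0 ∧ i ≤ n ∧ PySem.Int.floordiv x i ≤ n then
            (if i = PySem.Int.floordiv x i then (1:Int) else 2) else 0) by
        funext cnt i; dsimp only []; split_ifs <;> ring]
  rw [PySem.List.foldl_add, zero_add, pyRange_sum]
  apply Finset.sum_congr rfl
  intro i hi
  have hi1 : 0 < i := by have := Finset.mem_Ico.mp hi; omega
  rw [PySem.Int.mod_eq_emod_of_pos hi1, PySem.Int.floordiv_eq_ediv_of_pos hi1]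

-- B's fold as a Finset sum of 0/1 row indicators
-- basic facts about a divisor pair-- basic facts about a divisor pair (a, x/a) of a positive x
lemma pair_facts (x a : Int) (hx : 0 < x) (ha : 0 < a) (hdvd : a ∣ x) :
    (x / a) * a = x ∧ x / (x / a) = a ∧ 1 ≤ x / a := by
  have h1 : (x / a) * a = x := Int.ediv_mul_cancel hdvd
  have h3 : 1 ≤ x / a := by
    rw [Int.le_ediv_iff_mul_le ha, one_mul]
    exact Int.le_of_dvd hx hdvd
  refine ⟨h1, ?_, h3⟩
  calc x / (x / a) = ((x / a) * a) / (x / a) := by rw [h1]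
    _ = a := Int.mul_ediv_cancel_left a (by omega)

-- ===== B-side: the factorization loop builds exactly the positive divisors =====

-- exists a positive prime divisor of any m ≥ 2, bounded by m
lemma exists_prime_dvd (m : Int) (hm : 2 ≤ m) :
    ∃ q : Int, Prime q ∧ 0 < q ∧ q ∣ m ∧ q ≤ m := by
  refine ⟨(m.toNat.minFac : Int), ?_, ?_, ?_, ?_⟩
  · exact Nat.prime_iff_prime_int.mp (Nat.minFac_prime (by omega))
  · have := Nat.minFac_pos m.toNat; omega
  · have h := Nat.minFac_dvd m.toNat
    have : ((m.toNat.minFac : Int)) ∣ ((m.toNat : Nat) : Int) := Int.natCast_dvd_natCast.mpr h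
    rwa [Int.toNat_of_nonneg (by omega)] at this
  · have h := Nat.minFac_le (by omega : 0 < m.toNat)
    omega

lemma prime_pos_two_le (q : Int) (hq : Prime q) (h0 : 0 < q) : 2 ≤ q := by
  have := hq.ne_one
  omega

-- under the 'all prime factors of m are ≥ p' invariant, a p dividing m is prime
lemma p_prime_of_min (m p : Int) (hp : 2 ≤ p) (hdvd : p ∣ m)
    (hmin : ∀ q : Int, Prime q → 0 < q → q ∣ m → p ≤ q) : Prime p := by
  obtain ⟨q, hq, hq0, hqp, hqle⟩ := exists_prime_dvd p hp
  have h1 : p ≤ q := hmin q hq hq0 (hqp.trans hdvd)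
  have : q = p := by omega
  rwa [← this]

-- positive split of a positive divisor of a product
lemma dvd_mul_split_pos (d a b : Int) (hd : 0 < d) (hdvd : d ∣ a * b) :
    ∃ a' b', 0 < a' ∧ 0 < b' ∧ a' ∣ a ∧ b' ∣ b ∧ d = a' * b' := by
  obtain ⟨a1, b1, ha1, hb1, heq⟩ := exists_dvd_and_dvd_of_dvd_mul hdvd
  refine ⟨|a1|, |b1|, ?_, ?_, (abs_dvd _ _).mpr ha1, (abs_dvd _ _).mpr hb1, ?_⟩
  · exact abs_pos.mpr (show a1 ≠ 0 by rintro rfl; simp at heq; omega)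
  · exact abs_pos.mpr (show b1 ≠ 0 by rintro rfl; simp at heq; omega)
  · rw [(abs_mul a1 b1).symm, ← heq, abs_of_pos hd]

-- positive divisors of a positive prime power are its powers
lemma dvd_prime_pow_int (p b : Int) (k : ℕ) (hp : Prime p) (hppos : 0 < p)
    (hb : 0 < b) (hdvd : b ∣ p ^ k) : ∃ i ≤ k, b = p ^ i := by
  obtain ⟨i, hik, hassoc⟩ := (dvd_prime_pow hp k).mp hdvd
  rcases Int.associated_iff.mp hassoc with h | h
  · exact ⟨i, hik, h⟩
  · exfalso
    have : (0:Int) < p ^ i := pow_pos hppos i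
    omega

-- division by p ≥ 2 strictly shrinks a positive m
lemma pv_ediv_lt (m p : Int) (hm : 0 < m) (hp : 2 ≤ p) : m / p < m := by
  rw [Int.ediv_lt_iff_lt_mul (by omega : (0:Int) < p)]
  nlinarith

-- exact spec of the inner strip loop: m = p^k * m' with p ∤ m' (fuel ≥ m suffices)
lemma stripLoop_spec (p : Int) (hp : 2 ≤ p) : ∀ (fuel : Nat) (m e : Int), 0 < m →
    m.toNat ≤ fuel →
    ∃ k : ℕ, (stripLoop fuel m p e).2 = e + k ∧ m = p ^ k * (stripLoop fuel m p e).1 ∧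
      0 < (stripLoop fuel m p e).1 ∧ ¬ p ∣ (stripLoop fuel m p e).1 := by
  intro fuel
  induction fuel with
  | zero =>
    intro m e hm hf
    omega
  | succ f ih =>
    intro m e hm hf
    rw [stripLoop]
    by_cases hmod : PySem.Int.mod m p = 0
    · rw [if_pos hmod]
      have hdvd : p ∣ m := (PySem.Int.mod_eq_zero_iff_dvd m p).mp hmod
      have hfd : PySem.Int.floordiv m p = m / p := PySem.Int.floordiv_eq_ediv_of_pos (by omega)
      have hlt : m / p < m := pv_ediv_lt m p hm hp
      have hmp : 0 < m / p := by
        have h5 : (m / p) * p = m := Int.ediv_mul_cancel hdvd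
        nlinarith [Int.ediv_nonneg (le_of_lt hm) (by omega : (0:Int) ≤ p)]
      rw [hfd]
      obtain ⟨k, hk1, hk2, hk3, hk4⟩ := ih (m / p) (e + 1) hmp (by omega)
      refine ⟨k + 1, by push_cast; omega, ?_, hk3, hk4⟩
      have h5 : (m / p) * p = m := Int.ediv_mul_cancel hdvd
      calc m = (m / p) * p := h5.symm
        _ = (p ^ k * (stripLoop f (m/p) p (e+1)).1) * p := by rw [← hk2]
        _ = p ^ (k+1) * (stripLoop f (m/p) p (e+1)).1 := by ring
    · rw [if_neg hmod]
      refine ⟨0, by omega, by simp, hm, ?_⟩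
      intro hdvd
      exact hmod ((PySem.Int.mod_eq_zero_iff_dvd m p).mpr hdvd)

-- unique factorization of a divisor of r * p^∞ into (divisor of r) * p^j
lemma pow_factor_unique (p r : Int) (hp : Prime p) (hppos : 0 < p) (hpr : ¬ p ∣ r)
    (d1 d2 : Int) (h1 : d1 ∣ r) (h2 : d2 ∣ r) (hd1 : 0 < d1) (hd2 : 0 < d2)
    (j1 j2 : ℕ) (heq : d1 * p ^ j1 = d2 * p ^ j2) : d1 = d2 ∧ j1 = j2 := by
  have hp2 : 2 ≤ p := by
    have := hp.ne_one
    omega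
  have key : ∀ (a b : Int) (i1 i2 : ℕ), a ∣ r → 0 < a → i1 ≤ i2 →
      a * p ^ i1 = b * p ^ i2 → a = b ∧ i1 = i2 := by
    intro a b i1 i2 ha ha0 hle he
    have hcan : a = b * p ^ (i2 - i1) := by
      have h3 : a * p ^ i1 = (b * p ^ (i2 - i1)) * p ^ i1 := by
        rw [he, mul_assoc, ← pow_add]
        congr 2
        omega
      exact mul_right_cancel₀ (by positivity) h3
    rcases Nat.eq_or_lt_of_le hle with rfl | hlt
    · simp at hcan
      exact ⟨by omega, rfl⟩
    · exfalso
      apply hpr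
      have hpa : p ∣ a := by
        rw [hcan]
        exact Dvd.dvd.mul_left (dvd_pow_self p (by omega : i2 - i1 ≠ 0)) b
      exact hpa.trans ha
  rcases le_total j1 j2 with hle | hle
  · exact key d1 d2 j1 j2 h1 hd1 hle heq
  · obtain ⟨h3, h4⟩ := key d2 d1 j2 j1 h2 hd2 hle heq.symm
    exact ⟨h3.symm, h4.symm⟩

-- one flatMap step: divisors of r become divisors of r * p^k
lemma flatStep (p r : Int) (k : ℕ) (hp : Prime p) (hppos : 0 < p) (hr : 0 < r)
    (hpr : ¬ p ∣ r) (divs : List Int) (hnd : divs.Nodup)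
    (hmem : ∀ d, d ∈ divs ↔ 0 < d ∧ d ∣ r) :
    (expandDivs p (k : Int) divs).Nodup ∧
    ∀ d', d' ∈ expandDivs p (k : Int) divs ↔ 0 < d' ∧ d' ∣ r * p ^ k := by
  unfold expandDivs
  constructor
  · rw [List.nodup_flatMap]
    constructor
    · intro d hd
      obtain ⟨hd0, hdr⟩ := (hmem d).mp hd
      apply (PySem.List.nodup_pyRange_one 0 ((k:Int)+1)).map_on
      intro j1 hj1 j2 hj2 he
      rw [PySem.List.mem_pyRange_one] at hj1 hj2
      obtain ⟨-, hje⟩ := pow_factor_unique p r hp hppos hpr d d hdr hdr hd0 hd0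
        j1.toNat j2.toNat he
      omega
    · refine hnd.imp_of_mem ?_
      intro d1 d2 h1 h2 hne
      rw [Function.onFun, List.disjoint_left]
      rintro z hz1 hz2
      rw [List.mem_map] at hz1 hz2
      obtain ⟨j1, hj1, rfl⟩ := hz1
      obtain ⟨j2, hj2, he⟩ := hz2
      obtain ⟨hd10, hd1r⟩ := (hmem d1).mp h1
      obtain ⟨hd20, hd2r⟩ := (hmem d2).mp h2
      obtain ⟨hde, -⟩ := pow_factor_unique p r hp hppos hpr d2 d1 hd2r hd1r hd20 hd10
        j2.toNat j1.toNat he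
      exact hne (hde.symm)
  · intro d'
    rw [List.mem_flatMap]
    constructor
    · rintro ⟨d, hd, hmm⟩
      rw [List.mem_map] at hmm
      obtain ⟨j, hj, rfl⟩ := hmm
      rw [PySem.List.mem_pyRange_one] at hj
      obtain ⟨hd0, hdr⟩ := (hmem d).mp hd
      exact ⟨by positivity, mul_dvd_mul hdr (pow_dvd_pow p (by omega))⟩
    · rintro ⟨hd0, hdvd⟩
      obtain ⟨a, b, ha0, hb0, har, hbp, rfl⟩ := dvd_mul_split_pos _ r (p ^ k) hd0 hdvd
      obtain ⟨i, hik, rfl⟩ := dvd_prime_pow_int p b k hp hppos hb0 hbp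
      refine ⟨a, (hmem a).mpr ⟨ha0, har⟩, ?_⟩
      rw [List.mem_map]
      refine ⟨(i : Int), PySem.List.mem_pyRange_one.mpr ⟨by omega, by omega⟩, ?_⟩
      simp

-- exit state of the outer loop: the remainder is 1 or a prime not dividing r
lemma factLoop_exit (m p r : Int) (hm0 : 0 < m) (hp2 : 2 ≤ p) (hsm : m < p * p)
    (hmin : ∀ q : Int, Prime q → 0 < q → q ∣ m → p ≤ q)
    (hcop : ∀ q : Int, Prime q → 0 < q → q ∣ m → ¬ q ∣ r) :
    m = 1 ∨ (Prime m ∧ ¬ m ∣ r) := by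
  rcases (by omega : m = 1 ∨ 2 ≤ m) with rfl | hm2
  · exact Or.inl rfl
  · right
    obtain ⟨q, hq, hq0, hqd, hqle⟩ := exists_prime_dvd m hm2
    have hpq : p ≤ q := hmin q hq hq0 hqd
    obtain ⟨t, ht⟩ := hqd
    have ht0 : 0 < t := by nlinarith
    have htm : m = q := by
      rcases (by omega : t = 1 ∨ 2 ≤ t) with rfl | ht2
      · omega
      · exfalso
        obtain ⟨q', hq', hq'0, hq'd, hq'le⟩ := exists_prime_dvd t ht2
        have hpq' : p ≤ q' := hmin q' hq' hq'0 (hq'd.trans ⟨q, by rw [ht]; ring⟩)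
        nlinarith
    have hpm : Prime m := htm ▸ hq
    exact ⟨hpm, hcop m hpm (by omega) dvd_rfl⟩

-- the outer-loop invariant: the loop turns 'divisors of r' into 'divisors of r''
-- while r' * remaining = r * m, and leaves remaining = 1 or a prime outside r'
-- (fuel ≥ m + 1 - p suffices)
lemma factLoop_inv : ∀ (fuel : Nat) (m p : Int) (divs : List Int) (r : Int),
    0 < m → 2 ≤ p → 0 < r →
    (∀ q : Int, Prime q → 0 < q → q ∣ m → p ≤ q) →
    (∀ q : Int, Prime q → 0 < q → q ∣ m → ¬ q ∣ r) →
    divs.Nodup → (∀ d, d ∈ divs ↔ 0 < d ∧ d ∣ r) →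
    m.toNat + 1 ≤ fuel + p.toNat →
    ∃ r' : Int, 0 < r' ∧ r' * (factLoop fuel m p divs).1 = r * m ∧
      (factLoop fuel m p divs).2.Nodup ∧
      (∀ d, d ∈ (factLoop fuel m p divs).2 ↔ 0 < d ∧ d ∣ r') ∧
      ((factLoop fuel m p divs).1 = 1 ∨
        (Prime (factLoop fuel m p divs).1 ∧ ¬ (factLoop fuel m p divs).1 ∣ r')) := by
  intro fuel
  induction fuel with
  | zero =>
    intro m p divs r hm0 hp2 hr0 hmin hcop hnd hmem hf
    rw [factLoop]
    have hsm : m < p * p := by nlinarith [(by omega : m < p)]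
    exact ⟨r, hr0, by ring, hnd, hmem, factLoop_exit m p r hm0 hp2 hsm hmin hcop⟩
  | succ f ih =>
    intro m p divs r hm0 hp2 hr0 hmin hcop hnd hmem hf
    rw [factLoop]
    by_cases hpp : p * p ≤ m
    · rw [if_pos hpp]
      by_cases hm : PySem.Int.mod m p = 0
      · rw [if_pos hm]
        have hpdvd : p ∣ m := (PySem.Int.mod_eq_zero_iff_dvd m p).mp hm
        have hpprime : Prime p := p_prime_of_min m p hp2 hpdvd hmin
        have hppos : 0 < p := by omega
        obtain ⟨k, hk1, hk2, hk3, hk4⟩ := stripLoop_spec p hp2 m.toNat m 0 hm0 (le_refl _)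
        have hpr : ¬ p ∣ r := hcop p hpprime hppos hpdvd
        have hkpos : 1 ≤ k := by
          by_contra hc
          push_neg at hc
          interval_cases k
          simp at hk2
          exact hk4 (hk2 ▸ hpdvd)
        obtain ⟨hndN, hmemN⟩ := flatStep p r k hpprime hppos hr0 hpr divs hnd hmem
        have hb : (stripLoop m.toNat m p 0).2 = (k : Int) := by omega
        rw [← hb] at hndN hmemN
        have hm'min : ∀ q : Int, Prime q → 0 < q → q ∣ (stripLoop m.toNat m p 0).1 → p ≤ q := by
          intro q hq hq0 hqd
          exact hmin q hq hq0 (hqd.trans ⟨p ^ k, by nth_rewrite 1 [hk2]; ring⟩)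
        have hm'cop : ∀ q : Int, Prime q → 0 < q → q ∣ (stripLoop m.toNat m p 0).1 →
            ¬ q ∣ r * p ^ k := by
          intro q hq hq0 hqd hqrp
          have hqne : q ≠ p := by
            rintro rfl
            exact hk4 hqd
          rcases hq.dvd_mul.mp hqrp with hqr | hqp
          · exact hcop q hq hq0 (hqd.trans ⟨p ^ k, by nth_rewrite 1 [hk2]; ring⟩) hqr
          · have hqp' : q ∣ p := hq.dvd_of_dvd_pow hqp
            obtain ⟨i, hi1, rfl⟩ := dvd_prime_pow_int p q 1 hpprime hppos hq0 (by simpa using hqp')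
            interval_cases i
            · exact hq.ne_one (by simp)
            · exact hqne (by simp)
        have hm'lt : (stripLoop m.toNat m p 0).1 < m := by
          have h1 : (2:Int) ≤ p ^ k := by
            calc (2:Int) = 2 ^ 1 := by norm_num
            _ ≤ 2 ^ k := by
                apply pow_le_pow_right₀ <;> omega
            _ ≤ p ^ k := by
                apply pow_le_pow_left₀ <;> omega
          have h2 : 2 * (stripLoop m.toNat m p 0).1 ≤ p ^ k * (stripLoop m.toNat m p 0).1 :=
            mul_le_mul_of_nonneg_right h1 hk3.le
          linarith [hk2, h2, hk3]
        obtain ⟨r', hr'0, hr'eq, hndF, hmemF, hlast⟩ :=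
          ih (stripLoop m.toNat m p 0).1 p (expandDivs p (stripLoop m.toNat m p 0).2 divs)
            (r * p ^ k) hk3 hp2 (by positivity) hm'min hm'cop hndN hmemN (by omega)
        refine ⟨r', hr'0, ?_, hndF, hmemF, hlast⟩
        rw [hr'eq]
        conv_rhs => rw [hk2]
        ring
      · rw [if_neg hm]
        have hnp : ¬ p ∣ m := fun hc => hm ((PySem.Int.mod_eq_zero_iff_dvd m p).mpr hc)
        apply ih m (p + 1) divs r hm0 (by omega) hr0 ?_ ?_ hnd hmem (by omega)
        · intro q hq hq0 hqd
          have := hmin q hq hq0 hqd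
          have hne : q ≠ p := by rintro rfl; exact hnp hqd
          omega
        · intro q hq hq0 hqd
          exact hcop q hq hq0 hqd
    · rw [if_neg hpp]
      exact ⟨r, hr0, by ring, hnd, hmem,
        factLoop_exit m p r hm0 hp2 (by omega) hmin hcop⟩

-- assemble the final list (the optional prime remainder step) from the invariant
lemma final_list_spec (x m r' : Int) (l2 : List Int) (hx : 0 < x) (hr'0 : 0 < r')
    (heq : r' * m = x) (hnd : l2.Nodup) (hmem : ∀ d, d ∈ l2 ↔ 0 < d ∧ d ∣ r')
    (hlast : m = 1 ∨ (Prime m ∧ ¬ m ∣ r')) :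
    (if 1 < m then l2 ++ l2.map (fun d => d * m) else l2).Nodup ∧
    ∀ d, d ∈ (if 1 < m then l2 ++ l2.map (fun d => d * m) else l2) ↔ 0 < d ∧ d ∣ x := by
  rcases hlast with rfl | ⟨hpm, hnm⟩
  · rw [if_neg (by omega)]
    have hrx : r' = x := by simpa using heq
    subst hrx
    exact ⟨hnd, hmem⟩
  · have hm0 : 0 < m := by nlinarith [mul_pos_iff.mp (heq ▸ hx)]
    have hm2 : 2 ≤ m := prime_pos_two_le m hpm hm0
    rw [if_pos (by omega)]
    constructor
    · refine List.Nodup.append hnd (hnd.map ?_) ?_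
      · intro a b hab
        exact mul_right_cancel₀ (by omega) hab
      · rw [List.disjoint_right]
        rintro z hz1 hz2
        rw [List.mem_map] at hz1
        obtain ⟨d0, hd0, rfl⟩ := hz1
        obtain ⟨hz0, hzr⟩ := (hmem _).mp hz2
        exact hnm ((dvd_mul_left m d0).trans hzr)
    · intro d
      rw [List.mem_append, List.mem_map]
      constructor
      · rintro (hd | ⟨d0, hd0, rfl⟩)
        · obtain ⟨h1, h2⟩ := (hmem d).mp hd
          exact ⟨h1, by rw [← heq]; exact h2.mul_right m⟩
        · obtain ⟨h1, h2⟩ := (hmem d0).mp hd0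
          exact ⟨by positivity, by rw [← heq]; exact mul_dvd_mul h2 dvd_rfl⟩
      · rintro ⟨hd0, hdx⟩
        obtain ⟨a, b, ha0, hb0, har, hbm, rfl⟩ :=
          dvd_mul_split_pos _ r' m hd0 (by rwa [heq])
        obtain ⟨i, hi1, rfl⟩ := dvd_prime_pow_int m b 1 hpm hm0 hb0 (by simpa using hbm)
        interval_cases i
        · exact Or.inl ((hmem _).mpr ⟨by simpa using ha0, by simpa using har⟩)
        · exact Or.inr ⟨a, (hmem a).mpr ⟨ha0, har⟩, by ring⟩

-- the final divisor list of B is exactly the positive divisors of x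
lemma divList_spec (x : Int) (hx : 0 < x) :
    (if 1 < (factLoop (x.toNat + 2) x 2 [1]).1 then
        (factLoop (x.toNat + 2) x 2 [1]).2 ++ (factLoop (x.toNat + 2) x 2 [1]).2.map (fun d => d * (factLoop (x.toNat + 2) x 2 [1]).1)
      else (factLoop (x.toNat + 2) x 2 [1]).2).Nodup ∧
    ∀ d, d ∈ (if 1 < (factLoop (x.toNat + 2) x 2 [1]).1 then
        (factLoop (x.toNat + 2) x 2 [1]).2 ++ (factLoop (x.toNat + 2) x 2 [1]).2.map (fun d => d * (factLoop (x.toNat + 2) x 2 [1]).1)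
      else (factLoop (x.toNat + 2) x 2 [1]).2) ↔ 0 < d ∧ d ∣ x := by
  obtain ⟨r', hr'0, hr'eq, hndF, hmemF, hlast⟩ := factLoop_inv (x.toNat + 2) x 2 [1] 1 hx (by omega)
    (by omega)
    (fun q hq hq0 _ => prime_pos_two_le q hq hq0)
    (fun q hq _ _ hd => hq.not_unit (isUnit_of_dvd_one hd))
    (by simp)
    (by
      intro d
      simp only [List.mem_singleton]
      constructor
      · rintro rfl
        exact ⟨by omega, dvd_rfl⟩
      · rintro ⟨hd0, hd1⟩
        rcases Int.isUnit_iff.mp (isUnit_of_dvd_one hd1) with rfl | rfl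
        · rfl
        · omega)
    (by omega)
  rw [one_mul] at hr'eq
  exact final_list_spec x _ r' _ hx hr'0 hr'eq hndF hmemF hlast

-- counting a duplicate-free divisor list against the n×n window = row indicators
lemma countP_divlist (n x : Int) (hx : 0 < x) (L : List Int) (hnd : L.Nodup)
    (hmem : ∀ d, d ∈ L ↔ 0 < d ∧ d ∣ x) :
    ((L.countP (fun d => decide (d ≤ n ∧ PySem.Int.floordiv x d ≤ n)) : Nat) : Int)
      = ∑ i ∈ Finset.Ico 1 (n + 1), (if condB n x i then (1:Int) else 0) := by
  rw [Finset.sum_boole]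
  rw [List.countP_eq_length_filter]
  have hnd2 : (L.filter (fun d => decide (d ≤ n ∧ PySem.Int.floordiv x d ≤ n))).Nodup :=
    hnd.filter _
  rw [← List.toFinset_card_of_nodup hnd2]
  congr 1
  apply Finset.card_bij (fun d _ => d)
  · intro d hd
    simp only [List.mem_toFinset, List.mem_filter, decide_eq_true_eq] at hd
    obtain ⟨hmm, hdn, hdq⟩ := hd
    obtain ⟨hd0, hdd⟩ := (hmem d).mp hmm
    rw [PySem.Int.floordiv_eq_ediv_of_pos hd0] at hdq
    have hfx := pair_facts x d hx hd0 hdd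
    simp only [Finset.mem_filter, Finset.mem_Ico, condB, PySem.Int.emod_eq_zero_iff_dvd]
    exact ⟨⟨by omega, by omega⟩, hdd, hfx.2.2, hdq⟩
  · intro d1 h1 d2 h2 h
    exact h
  · intro d hd
    simp only [Finset.mem_filter, Finset.mem_Ico, condB, PySem.Int.emod_eq_zero_iff_dvd] at hd
    obtain ⟨⟨hd1, hdn⟩, hdvd, hq1, hqn⟩ := hd
    refine ⟨d, ?_, rfl⟩
    simp only [List.mem_toFinset, List.mem_filter, decide_eq_true_eq]
    refine ⟨(hmem d).mpr ⟨by omega, hdvd⟩, by omega, ?_⟩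
    rw [PySem.Int.floordiv_eq_ediv_of_pos (by omega : (0:Int) < d)]
    exact hqn


-- B's two-phase computation as a Finset sum of 0/1 row indicators
lemma count_alt_eq_sum (n x : Int) (hx : 0 ≤ x) :
    count_alt n x = ∑ i ∈ Finset.Ico 1 (n + 1), (if condB n x i then (1:Int) else 0) := by
  rcases (by omega : x = 0 ∨ 0 < x) with rfl | hx0
  · unfold count_alt
    rw [if_pos (by omega : (0:Int) ≤ 0)]
    rw [Finset.sum_eq_zero]
    intro i hi
    have hi1 : 0 < i := by have := Finset.mem_Ico.mp hi; omega
    simp [condB]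
  · unfold count_alt
    rw [if_neg (by omega)]
    obtain ⟨hnd, hmem⟩ := divList_spec x hx0
    exact countP_divlist n x hx0 _ hnd hmem


-- the combinatorial core: divisor-pair weights up to sqrt(x) = row indicators up to n
lemma sum_pairs_eq_sum_rows (n x : Int) (hx : 0 ≤ x) :
    (∑ i ∈ Finset.Ico 1 (Int.sqrt x + 1),
       (if condA n x i then (if i = x / i then (1:Int) else 2) else 0))
    = ∑ i ∈ Finset.Ico 1 (n + 1), (if condB n x i then (1:Int) else 0) := by
  rcases (by omega : x = 0 ∨ 0 < x) with rfl | hx0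
  · rw [Finset.sum_eq_zero, Finset.sum_eq_zero]
    · intro i hi
      have hi1 : 0 < i := by have := Finset.mem_Ico.mp hi; omega
      simp [condB]
    · intro i hi
      have := Finset.mem_Ico.mp hi
      have hs : Int.sqrt 0 = 0 := rfl
      omega
  · rw [← Finset.sum_filter, ← Finset.sum_filter]
    -- |T| split by i ≤ sqrt x
    have hsplit :
        (((Finset.Ico 1 (n + 1)).filter (condB n x)).filter (fun i => i ≤ Int.sqrt x)).card
          + (((Finset.Ico 1 (n + 1)).filter (condB n x)).filter (fun i => ¬ i ≤ Int.sqrt x)).card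
        = ((Finset.Ico 1 (n + 1)).filter (condB n x)).card :=
      Finset.filter_card_add_filter_neg_card_eq_card _
    -- the small half of T is exactly T₁
    have hlow : ((Finset.Ico 1 (n + 1)).filter (condB n x)).filter (fun i => i ≤ Int.sqrt x)
        = (Finset.Ico 1 (Int.sqrt x + 1)).filter (condA n x) := by
      ext i
      simp only [Finset.mem_filter, Finset.mem_Ico, condA, condB,
        PySem.Int.emod_eq_zero_iff_dvd]
      constructor
      · rintro ⟨⟨⟨hi1, _⟩, hdvd, hj1, hjn⟩, his⟩
        exact ⟨⟨hi1, by omega⟩, hdvd, by omega, hjn⟩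
      · rintro ⟨⟨hi1, his⟩, hdvd, hin, hjn⟩
        have hfx := pair_facts x i hx0 (by omega) hdvd
        exact ⟨⟨⟨hi1, by omega⟩, hdvd, hfx.2.2, hjn⟩, by omega⟩
    -- the large half of T is in bijection (via i ↦ x / i) with the off-diagonal part of T₁
    have hbij : (((Finset.Ico 1 (n + 1)).filter (condB n x)).filter (fun i => ¬ i ≤ Int.sqrt x)).card
        = (((Finset.Ico 1 (Int.sqrt x + 1)).filter (condA n x)).filter (fun i => ¬ i = x / i)).card := by
      apply Finset.card_nbij' (fun a => x / a) (fun b => x / b)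
      · intro a hamem
        simp only [Finset.mem_coe, Finset.mem_filter, Finset.mem_Ico, condA, condB,
          PySem.Int.emod_eq_zero_iff_dvd] at hamem ⊢
        obtain ⟨⟨⟨ha1, _⟩, hdvd, hb1, hbn⟩, hbig⟩ := hamem
        have hfx := pair_facts x a hx0 (by omega) hdvd
        have hxa : x < a * a := by
          by_contra hcon
          exact hbig ((le_sqrt_iff x a (by omega)).mpr (by omega))
        have hba : x / a < a := by nlinarith [hfx.1]
        have hbs : x / a ≤ Int.sqrt x := by
          apply (le_sqrt_iff x (x / a) (by omega)).mpr
          nlinarith [hfx.1]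
        refine ⟨⟨⟨hb1, by omega⟩, ⟨a, hfx.1.symm⟩, hbn, ?_⟩, ?_⟩
        · rw [hfx.2.1]; omega
        · rw [hfx.2.1]; omega
      · intro b hbmem
        simp only [Finset.mem_coe, Finset.mem_filter, Finset.mem_Ico, condA, condB,
          PySem.Int.emod_eq_zero_iff_dvd] at hbmem ⊢
        obtain ⟨⟨⟨hb1, hbs⟩, hdvd, hbn, han⟩, hne⟩ := hbmem
        have hfx := pair_facts x b hx0 (by omega) hdvd
        have hbb : b * b ≤ x := (le_sqrt_iff x b (by omega)).mp (by omega)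
        have hba : b < x / b := by
          rcases lt_or_eq_of_le (show b ≤ x / b by nlinarith [hfx.1]) with h | h
          · exact h
          · exact absurd h.symm (by omega)
        refine ⟨⟨⟨by omega, by omega⟩, ⟨b, hfx.1.symm⟩, ?_, ?_⟩, ?_⟩
        · rw [hfx.2.1]; omega
        · rw [hfx.2.1]; omega
        · intro hcon
          have := (le_sqrt_iff x (x / b) (by omega)).mp hcon
          nlinarith [hfx.1]
      · intro a hamem
        simp only [Finset.mem_coe, Finset.mem_filter, Finset.mem_Ico, condB,
          PySem.Int.emod_eq_zero_iff_dvd] at hamem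
        obtain ⟨⟨⟨ha1, _⟩, hdvd, _⟩, _⟩ := hamem
        exact (pair_facts x a hx0 (by omega) hdvd).2.1
      · intro b hbmem
        simp only [Finset.mem_coe, Finset.mem_filter, Finset.mem_Ico, condA,
          PySem.Int.emod_eq_zero_iff_dvd] at hbmem
        obtain ⟨⟨⟨hb1, _⟩, hdvd, _⟩, _⟩ := hbmem
        exact (pair_facts x b hx0 (by omega) hdvd).2.1
    -- assemble: LHS = E + 2N, RHS = |T| = (E + N) + N
    rw [Finset.sum_ite]
    have hcard :
        (((Finset.Ico 1 (Int.sqrt x + 1)).filter (condA n x)).filter (fun i => i = x / i)).card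
          + (((Finset.Ico 1 (Int.sqrt x + 1)).filter (condA n x)).filter (fun i => ¬ i = x / i)).card
        = ((Finset.Ico 1 (Int.sqrt x + 1)).filter (condA n x)).card :=
      Finset.filter_card_add_filter_neg_card_eq_card _
    rw [hlow] at hsplit
    simp only [Finset.sum_const, nsmul_eq_mul, mul_one]
    rw [hbij] at hsplit
    push_cast [← hsplit, ← hcard]
    ring

-- ===== VERDICT =====
theorem count_spec : Claim_equal_count := by
  intro n x _ hpre
  unfold Spec_count
  rw [count_eq_sum, count_alt_eq_sum n x hpre]
  exact sum_pairs_eq_sum_rows n x hpre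

@[simp]
theorem count_raises : Claim_raises_count := by
  unfold Claim_raises_count
  exact ⟨by intro n x _ h hp; unfold Raises_count at h; unfold Pre_count at hp; omega, by decide⟩
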